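-- pv_equiv track=rewrite | github.com/Basanth08/PYTHON |  Conditionals, Loops, Strings & The Debugger/group_characters.py | group_characters
-- ===== SOURCE A (Python) =====
-- def is_upper(character):
--     value = ord(character)
--     if value >= 64 and value <= 91:
--         return True
--     else:
--         return False
--
-- def is_lower(character):
--     value = ord(character)
--     if value >= 97 and value <= 122:
--         return True
--     else:
--         return False
--
-- def is_digit(character):
--     value = ord(character)
--     if value >= 48 and value <= 57:
--         return True
--     else:
--         return False
--
-- def group_characters(string):
--     index = 0
--     newString = ''
--     while(index<len(string)):
--         if(is_digit(string[index])==True):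
--             newString = newString + string[index]
--         index = index + 1
--     index = 0
--     while(index<len(string)):
--         if(is_lower(string[index])==True):
--             newString = newString + string[index]
--         index = index + 1
--     index = 0
--     while(index<len(string)):
--         if(is_upper(string[index])==True):
--             newString = newString + string[index]
--         index = index + 1
--     return (newString)
-- ===== SOURCE B (Python) =====
-- def group_characters(string):
--     digits = []
--     lowers = []
--     uppers = []
--     for ch in string:
--         v = ord(ch)
--         if 48 <= v <= 57:
--             digits.append(ch)
--         elif 97 <= v <= 122:
--             lowers.append(ch)
--         elif 64 <= v <= 91:
--             uppers.append(ch)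
--     return ''.join(digits) + ''.join(lowers) + ''.join(uppers)
-- ===== Notes on version B (the rewrite author's own statement) =====
-- stated objective: faster
-- what changed: B makes a single classifying pass appending each character to one of three bucket lists (using the same ord ranges as A, including A's 64-91 'upper' range) and joins them, instead of A's three full scans with repeated string concatenation.
import Mathlib
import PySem

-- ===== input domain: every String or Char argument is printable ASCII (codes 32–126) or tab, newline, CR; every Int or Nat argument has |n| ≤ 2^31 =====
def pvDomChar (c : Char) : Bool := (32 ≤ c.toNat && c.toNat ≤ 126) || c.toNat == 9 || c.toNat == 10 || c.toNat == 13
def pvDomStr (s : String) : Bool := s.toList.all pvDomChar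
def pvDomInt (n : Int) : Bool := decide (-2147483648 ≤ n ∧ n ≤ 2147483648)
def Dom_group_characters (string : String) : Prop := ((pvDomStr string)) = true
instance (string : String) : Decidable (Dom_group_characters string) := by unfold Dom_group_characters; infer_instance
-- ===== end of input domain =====

-- B replaces A's three full scans (with string concatenation) by one classifying pass into three buckets; same ord ranges as A.

-- ===== PORT A =====
def is_upper (c : Char) : Bool := 64 ≤ c.toNat && c.toNat ≤ 91
def is_lower (c : Char) : Bool := 97 ≤ c.toNat && c.toNat ≤ 122
def is_digit (c : Char) : Bool := 48 ≤ c.toNat && c.toNat ≤ 57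

-- each while loop: index walks the string appending matching chars to the accumulator
def gcPass (p : Char → Bool) (acc : List Char) (cs : List Char) : List Char :=
  cs.foldl (fun a c => if p c then a ++ [c] else a) acc

def group_characters (string : String) : String :=
  let cs := string.toList
  let a1 := gcPass is_digit [] cs
  let a2 := gcPass is_lower a1 cs
  let a3 := gcPass is_upper a2 cs
  String.ofList a3

-- ===== PORT B =====
-- single pass maintaining three buckets (digits, lowers, uppers)
def gcStep (b : List Char × List Char × List Char) (c : Char) : List Char × List Char × List Char :=
  let v := c.toNat
  if 48 ≤ v ∧ v ≤ 57 then (b.1 ++ [c], b.2.1, b.2.2)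
  else if 97 ≤ v ∧ v ≤ 122 then (b.1, b.2.1 ++ [c], b.2.2)
  else if 64 ≤ v ∧ v ≤ 91 then (b.1, b.2.1, b.2.2 ++ [c])
  else b

def group_characters_alt (string : String) : String :=
  let b := string.toList.foldl gcStep ([], [], [])
  String.ofList b.1 ++ String.ofList b.2.1 ++ String.ofList b.2.2

-- ===== PRECONDITION & SPEC =====
def Spec_group_characters (string : String) (out : String) : Prop := out = group_characters_alt string
instance (string : String) (out : String) : Decidable (Spec_group_characters string out) := by unfold Spec_group_characters; infer_instance

-- ===== CLAIM (what is proved, stated in full; the proofs are below) =====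
def Claim_equal_group_characters : Prop := ∀ (string : String), Dom_group_characters string → Spec_group_characters string (group_characters string)

-- ===== LEMMAS AND PROOFS =====

theorem gcPass_eq_filter (p : Char → Bool) (acc cs : List Char) :
    gcPass p acc cs = acc ++ cs.filter p := by
  induction cs generalizing acc with
  | nil => simp [gcPass]
  | cons c t ih =>
    simp only [gcPass, List.foldl_cons, List.filter_cons]
    by_cases h : p c <;> simp [h, gcPass] at ih ⊢ <;> rw [ih] <;> simp

theorem gcStep_foldl (cs d l u : List Char) :
    cs.foldl gcStep (d, l, u) =
      (d ++ cs.filter is_digit, l ++ cs.filter is_lower, u ++ cs.filter is_upper) := by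
  induction cs generalizing d l u with
  | nil => simp
  | cons c t ih =>
    simp only [List.foldl_cons, List.filter_cons]
    have hd : (48 ≤ c.toNat ∧ c.toNat ≤ 57) ↔ is_digit c = true := by
      simp [is_digit]
    have hl : (97 ≤ c.toNat ∧ c.toNat ≤ 122) ↔ is_lower c = true := by
      simp [is_lower]
    have hu : (64 ≤ c.toNat ∧ c.toNat ≤ 91) ↔ is_upper c = true := by
      simp [is_upper]
    by_cases h1 : is_digit c = true
    · have h2 : ¬ is_lower c = true := by simp [is_digit] at h1; simp [is_lower]; omega
      have h3 : ¬ is_upper c = true := by simp [is_digit] at h1; simp [is_upper]; omega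
      simp only [gcStep, hd, hl, hu, h1, h2, h3, if_pos, if_neg, if_true, if_false]
      rw [ih]; simp [h1, h2, h3]
    · by_cases h2 : is_lower c = true
      · have h3 : ¬ is_upper c = true := by simp [is_lower] at h2; simp [is_upper]; omega
        simp only [gcStep, hd, hl, hu, h1, h2, h3, if_neg, if_pos, if_true, if_false]
        rw [ih]; simp [h1, h2, h3]
      · by_cases h3 : is_upper c = true
        · simp only [gcStep, hd, hl, hu, h1, h2, h3, if_neg, if_pos, if_true, if_false]
          rw [ih]; simp [h1, h2, h3]
        · simp only [gcStep, hd, hl, hu, h1, h2, h3, if_neg, if_false]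
          rw [ih]; simp [h1, h2, h3]

theorem mk_append (a b : List Char) : String.ofList a ++ String.ofList b = String.ofList (a ++ b) :=
  Eq.symm String.ofList_append

-- ===== VERDICT (by name: the statement is the Claim_ definition above) =====
theorem group_characters_spec : Claim_equal_group_characters := by
  intro s _
  unfold Spec_group_characters group_characters group_characters_alt
  rw [gcStep_foldl]
  simp only [gcPass_eq_filter, mk_append]
  simp
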